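-- pv_equiv track=rewrite | github.com/IamOye/channel-forge | src/media/thumbnail_generator.py | _find_provocative_word
-- ===== SOURCE A (Python) =====
-- def _find_provocative_word(text: str) -> str:
--     """Return the most provocative word in text (first noun/adjective heuristic)."""
--     # Prefer strong emotive words; fall back to longest word
--     strong = ["broke", "poor", "rich", "never", "always", "lie", "secret",
--               "truth", "wrong", "mistake", "lose", "cost", "steal", "trap",
--               "fool", "myth", "scam", "hack", "cheat", "fail", "win"]
--     lower = text.lower()
--     for w in strong:
--         if w in lower.split():
--             # Find original-case version
--             for word in text.split():
--                 if word.lower().rstrip(",.!?") == w: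
--                     return word.rstrip(",.!?")
--     # Fall back: longest word
--     words = [w.rstrip(",.!?") for w in text.split() if len(w) > 3]
--     return max(words, key=len) if words else (text.split()[0] if text else "")
-- ===== SOURCE B (Python) =====
-- def _find_provocative_word(text: str) -> str:
--     """Return the most provocative word in text (first noun/adjective heuristic)."""
--     strong = ["broke", "poor", "rich", "never", "always", "lie", "secret",
--               "truth", "wrong", "mistake", "lose", "cost", "steal", "trap",
--               "fool", "myth", "scam", "hack", "cheat", "fail", "win"]
--     K = len(strong)
--     rank = {}
--     i = 0
--     for w in strong:
--         rank[w] = i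
--         i += 1
--     parts = text.split()
--     # Single pass over the words: minimum strong-rank among raw lowercased
--     # tokens, first original word per strong stripped key, and the longest
--     # (>3 chars raw) stripped word, all in one accumulator sweep.
--     best = K
--     hit = {}
--     has_long = False
--     longest = ""
--     for word in parts:
--         lw = word.lower()
--         best = min(best, rank.get(lw, K))
--         stripped = word.rstrip(",.!?")
--         r = rank.get(lw.rstrip(",.!?"))
--         if r is not None and r not in hit:
--             hit[r] = stripped
--         if len(word) > 3:
--             if len(stripped) > len(longest):
--                 longest = stripped
--             has_long = True
--     if best < K:
--         return hit[best]
--     if has_long: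
--         return longest
--     return parts[0] if parts else ""
-- ===== Notes on version B (the rewrite author's own statement) =====
-- stated objective: faster
-- what changed: A loops over the 21 strong words, rescanning the whole split text per strong word (membership test plus an inner scan); B inverts the traversal: one forward pass over the words with three accumulators (minimum strong-rank of the raw lowercased tokens via a rank dict, first stripped word per rank, and the running longest >3-char stripped word), then answers from the accumulators.
-- outside the precondition, e.g. on _find_provocative_word(' '): A raises IndexError, B returns ''
import Mathlib
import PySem

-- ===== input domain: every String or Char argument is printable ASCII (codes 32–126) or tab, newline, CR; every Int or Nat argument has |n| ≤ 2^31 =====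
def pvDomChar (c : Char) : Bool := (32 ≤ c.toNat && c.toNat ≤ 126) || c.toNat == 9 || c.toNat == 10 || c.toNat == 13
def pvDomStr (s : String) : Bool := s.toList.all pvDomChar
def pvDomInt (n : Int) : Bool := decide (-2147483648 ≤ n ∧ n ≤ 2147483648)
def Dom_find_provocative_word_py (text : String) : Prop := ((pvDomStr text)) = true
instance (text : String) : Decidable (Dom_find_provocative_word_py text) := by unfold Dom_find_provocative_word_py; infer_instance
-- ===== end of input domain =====

-- B replaces A's outer loop over the strong list (with a full rescan of the text per strong word) by ONE forward pass over the
-- words keeping three accumulators (minimum strong-rank seen, first hit word per rank, longest >3-char stripped word).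


-- shared literal list of strong words (the Python literal, used by both programs)
def pvStrong : List String :=
  ["broke", "poor", "rich", "never", "always", "lie", "secret",
   "truth", "wrong", "mistake", "lose", "cost", "steal", "trap",
   "fool", "myth", "scam", "hack", "cheat", "fail", "win"]

-- hand port of Python's s.rstrip(",.!?") (PySem has no chars-argument rstrip): drop those chars from the end; exact for every string
def pvRstripP (cs : List Char) : List Char :=
  (cs.reverse.dropWhile (fun c => c = ',' ∨ c = '.' ∨ c = '!' ∨ c = '?')).reverse

def pvRstripS (s : String) : String := String.ofList (pvRstripP s.toList)

-- ===== PORT A =====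
-- inner loop: 'for word in text.split(): if word.lower().rstrip(",.!?") == w: return word.rstrip(",.!?")'
def pvInnerA (w : String) : List String → Option String
  | [] => none
  | word :: rest =>
      if pvRstripS (PySem.Str.lower word) = w then some (pvRstripS word) else pvInnerA w rest

-- outer loop over the strong list; falling off the inner loop continues with the next strong word
def pvOuterA (parts lowerWords : List String) : List String → Option String
  | [] => none
  | w :: rest =>
      if lowerWords.contains w then
        match pvInnerA w parts with
        | some r => some r
        | none => pvOuterA parts lowerWords rest
      else pvOuterA parts lowerWords rest

def find_provocative_word_py (text : String) : String :=
  let lower := PySem.Str.lower text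
  match pvOuterA (PySem.Str.split₀ text) (PySem.Str.split₀ lower) pvStrong with
  | some r => r
  | none =>
      let words := ((PySem.Str.split₀ text).filter (fun w => 3 < PySem.Str.len w)).map pvRstripS
      if words ≠ [] then PySem.List.maxD words PySem.Str.len ""
      else if text.toList ≠ [] then
        -- Python indexes the first element of the split here and raises IndexError when the split is empty (whitespace-only text); Pre_ excludes that
        (PySem.List.pyGet? (PySem.Str.split₀ text) 0).getD ""
      else ""

-- ===== PORT B =====
-- rank = {}; for w in strong: rank[w] = i; i += 1   (K = len(strong) = 21)
def pvRank : PySem.Dict String Int :=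
  (pvStrong.foldl (fun st w => (st.1.insert w st.2, st.2 + 1))
    ((PySem.Dict.empty : PySem.Dict String Int), (0 : Int))).1

-- the three accumulator updates of B's single loop body
def pvBestStep (b : Int) (word : String) : Int :=
  min b (pvRank.getD (PySem.Str.lower word) 21)

def pvHitStep (h : PySem.Dict Int String) (word : String) : PySem.Dict Int String :=
  match pvRank.get? (pvRstripS (PySem.Str.lower word)) with
  | some r => if h.contains r then h else h.insert r (pvRstripS word)
  | none => h

def pvLongStep (st : Bool × String) (word : String) : Bool × String :=
  if 3 < PySem.Str.len word then
    (true, if PySem.Str.len st.2 < PySem.Str.len (pvRstripS word) then pvRstripS word else st.2)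
  else st

def pvStepB (st : Int × PySem.Dict Int String × Bool × String) (word : String) :
    Int × PySem.Dict Int String × Bool × String :=
  (pvBestStep st.1 word, pvHitStep st.2.1 word, pvLongStep st.2.2 word)

def find_provocative_word_py_alt (text : String) : String :=
  let parts := PySem.Str.split₀ text
  let st := parts.foldl pvStepB (21, PySem.Dict.empty, false, "")
  -- hit[best]: when best < 21 the key is always present (proved below), so Python's KeyError branch is dead; ported with getD
  if st.1 < 21 then ((st.2.1).get? st.1).getD ""
  else if st.2.2.1 = true then st.2.2.2
  else match parts with
       | [] => ""
       | p :: _ => p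

-- ===== PRECONDITION & SPEC =====
-- Pre_ excludes exactly the nonempty all-whitespace texts, on which A raises IndexError indexing the empty split.
def Pre_find_provocative_word_py (text : String) : Prop := PySem.Str.strIsspace text = false
instance (text : String) : Decidable (Pre_find_provocative_word_py text) := by
  unfold Pre_find_provocative_word_py; infer_instance

def pvWitness_find_provocative_word_py : String := "you are Broke, broke today"

def Spec_find_provocative_word_py (text : String) (out : String) : Prop :=
  out = find_provocative_word_py_alt text
instance (text : String) (out : String) : Decidable (Spec_find_provocative_word_py text out) := by
  unfold Spec_find_provocative_word_py; infer_instance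

-- ===== CLAIM (what is proved, stated in full; the proofs are below) =====
def Claim_equal_find_provocative_word_py : Prop :=
  ∀ (text : String), Dom_find_provocative_word_py text → Pre_find_provocative_word_py text →
    Spec_find_provocative_word_py text (find_provocative_word_py text)

-- ===== LEMMAS AND PROOFS =====

-- lowering a character never changes whether it is whitespace
theorem pv_isspace_false_of_range (d : Char) (h1 : 65 ≤ d.toNat) (h2 : d.toNat ≤ 122) :
    PySem.Chars.isspace d = false := by
  unfold PySem.Chars.isspace
  simp only [Bool.or_eq_false_iff, Bool.and_eq_false_iff, decide_eq_false_iff_not]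
  omega

theorem pv_isspace_lowerChar (c : Char) :
    PySem.Chars.isspace (PySem.Chars.lowerChar c) = PySem.Chars.isspace c := by
  unfold PySem.Chars.lowerChar
  by_cases h : PySem.Chars.isupper c = true
  · simp only [h, if_true]
    unfold PySem.Chars.isupper at h
    simp only [Bool.and_eq_true, decide_eq_true_eq, Char.le_def, UInt32.le_iff_toNat_le] at h
    have e1 : ('A' : Char).val.toNat = 65 := rfl
    have e2 : ('Z' : Char).val.toNat = 90 := rfl
    rw [e1, e2] at h
    have hb : 65 ≤ c.toNat ∧ c.toNat ≤ 90 := h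
    have hv : (Char.ofNat (c.toNat + 32)).toNat = c.toNat + 32 := by
      rw [Char.toNat_ofNat, if_pos]
      exact Or.inl (by omega)
    rw [pv_isspace_false_of_range c (by omega) (by omega),
        pv_isspace_false_of_range _ (by omega) (by omega)]
  · simp [h]

-- split-on-whitespace commutes with per-character lowering (go form)
theorem pv_split_go_lower (cs cur : List Char) (acc : List (List Char)) :
    PySem.Chars.split₀.go (cs.map PySem.Chars.lowerChar) (cur.map PySem.Chars.lowerChar)
        (acc.map (List.map PySem.Chars.lowerChar))
      = (PySem.Chars.split₀.go cs cur acc).map (List.map PySem.Chars.lowerChar) := by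
  induction cs generalizing cur acc with
  | nil =>
      simp only [List.map_nil, PySem.Chars.split₀.go]
      by_cases h : cur.isEmpty = true
      · simp [List.isEmpty_iff.mp h]
      · have : (cur.map PySem.Chars.lowerChar).isEmpty = false := by
          simp only [List.isEmpty_eq_false_iff] at h ⊢; simpa using h
        simp [h, this, List.map_reverse]
  | cons c rest ih =>
      simp only [List.map_cons, PySem.Chars.split₀.go, pv_isspace_lowerChar]
      by_cases hs : PySem.Chars.isspace c = true
      · simp only [hs, if_true]
        by_cases h : cur.isEmpty = true
        · have : (cur.map PySem.Chars.lowerChar).isEmpty = true := by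
            simp [List.isEmpty_iff.mp h]
          simp only [h, this, if_true]
          exact ih [] acc
        · have h2 : (cur.map PySem.Chars.lowerChar).isEmpty = false := by
            simp only [List.isEmpty_eq_false_iff] at h ⊢; simpa using h
          simp only [h, h2, if_false, Bool.false_eq_true]
          have := ih [] (cur.reverse :: acc)
          simpa [List.map_reverse] using this
      · simp only [hs, if_false, Bool.false_eq_true]
        exact ih (c :: cur) acc

theorem pv_split_lower (cs : List Char) :
    PySem.Chars.split₀ (PySem.Chars.lower cs)
      = (PySem.Chars.split₀ cs).map PySem.Chars.lower := by
  unfold PySem.Chars.lower PySem.Chars.split₀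
  simpa using pv_split_go_lower cs [] []

-- String-level: text.lower().split() = [w.lower() for w in text.split()]
theorem pv_str_split_lower (text : String) :
    PySem.Str.split₀ (PySem.Str.lower text)
      = (PySem.Str.split₀ text).map PySem.Str.lower := by
  unfold PySem.Str.split₀ PySem.Str.lower
  simp only [String.toList_ofList, pv_split_lower, List.map_map]
  apply List.map_congr_left
  intro a _
  simp [PySem.Chars.lower]

-- split₀ produces no output from all-whitespace input (go form)
theorem pv_split_go_ne_nil (cs cur : List Char) (acc : List (List Char)) :
    PySem.Chars.split₀.go cs cur acc = [] →
      acc = [] ∧ cur = [] ∧ cs.all PySem.Chars.isspace = true := by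
  induction cs generalizing cur acc with
  | nil =>
      intro h
      simp only [PySem.Chars.split₀.go] at h
      by_cases hc : cur.isEmpty = true
      · simp only [hc, if_true, List.reverse_eq_nil_iff] at h
        exact ⟨h, List.isEmpty_iff.mp hc, rfl⟩
      · simp [hc] at h
  | cons c rest ih =>
      intro h
      simp only [PySem.Chars.split₀.go] at h
      by_cases hs : PySem.Chars.isspace c = true
      · simp only [hs, if_true] at h
        by_cases hc : cur.isEmpty = true
        · simp only [hc, if_true] at h
          obtain ⟨ha, _, hall⟩ := ih [] acc h
          exact ⟨ha, List.isEmpty_iff.mp hc, by simp [hs, hall]⟩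
        · simp only [hc, if_false, Bool.false_eq_true] at h
          obtain ⟨ha, _, _⟩ := ih [] (cur.reverse :: acc) h
          simp at ha
      · simp only [hs, if_false, Bool.false_eq_true] at h
        obtain ⟨_, hc, _⟩ := ih (c :: cur) acc h
        simp at hc

theorem pv_split_ne_nil (text : String) (hne : text.toList ≠ [])
    (hsp : PySem.Str.strIsspace text = false) : PySem.Str.split₀ text ≠ [] := by
  intro h
  unfold PySem.Str.split₀ at h
  rw [List.map_eq_nil_iff] at h
  obtain ⟨_, _, hall⟩ := pv_split_go_ne_nil text.toList [] [] h
  unfold PySem.Str.strIsspace PySem.Chars.strIsspace at hsp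
  rw [Bool.and_eq_false_iff] at hsp
  rcases hsp with hsp | hsp
  · have hempty : text.toList.isEmpty = true := by
      revert hsp; cases text.toList.isEmpty <;> simp
    exact hne (List.isEmpty_iff.mp hempty)
  · rw [hall] at hsp
    exact Bool.noConfusion hsp

-- A's inner scan succeeds whenever some word of parts lowercases to w and w is rstrip-fixed
theorem pv_innerA_isSome (w : String) (parts : List String)
    (hw : pvRstripS w = w)
    (hex : ∃ word ∈ parts, PySem.Str.lower word = w) : (pvInnerA w parts).isSome := by
  induction parts with
  | nil => simp at hex
  | cons word rest ih =>
      simp only [pvInnerA]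
      by_cases h : pvRstripS (PySem.Str.lower word) = w
      · simp [h]
      · simp only [h, if_false]
        apply ih
        obtain ⟨x, hx, hlx⟩ := hex
        rcases List.mem_cons.mp hx with rfl | hx'
        · exact absurd (by rw [hlx, hw]) h
        · exact ⟨x, hx', hlx⟩

-- ---- proof-side index function: position of x in a list ----
def pvIdx (x : String) : List String → Option Nat
  | [] => none
  | w :: rest => if w = x then some 0 else (pvIdx x rest).map (· + 1)

theorem pvIdx_lt {x : String} {l : List String} {n : Nat} (h : pvIdx x l = some n) :
    n < l.length := by
  induction l generalizing n with
  | nil => simp [pvIdx] at h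
  | cons w rest ih =>
      simp only [pvIdx] at h
      by_cases hw : w = x
      · rw [if_pos hw] at h
        injection h with h
        rw [← h, List.length_cons]
        omega
      · simp only [hw, if_false] at h
        cases hm : pvIdx x rest with
        | none => rw [hm] at h; simp at h
        | some m =>
            rw [hm] at h
            simp only [Option.map_some, Option.some.injEq] at h
            have := ih hm
            rw [← h, List.length_cons]
            omega

theorem pvIdx_getElem? {x : String} {l : List String} {n : Nat} (h : pvIdx x l = some n) :
    l[n]? = some x := by
  induction l generalizing n with
  | nil => simp [pvIdx] at h
  | cons w rest ih =>
      simp only [pvIdx] at h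
      by_cases hw : w = x
      · simp [hw] at h; simp [← h, hw]
      · simp only [hw, if_false] at h
        cases hm : pvIdx x rest with
        | none => rw [hm] at h; simp at h
        | some m =>
            rw [hm] at h
            simp only [Option.map_some, Option.some.injEq] at h
            subst h
            simpa using ih hm

theorem pvIdx_isSome_of_mem {x : String} {l : List String} (h : x ∈ l) :
    (pvIdx x l).isSome := by
  induction l with
  | nil => simp at h
  | cons w rest ih =>
      simp only [pvIdx]
      by_cases hw : w = x
      · simp [hw]
      · rcases List.mem_cons.mp h with rfl | hx
        · exact absurd rfl hw
        · simp only [hw, if_false, Option.isSome_map]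
          exact ih hx

theorem pvIdx_of_getElem? {x : String} {l : List String} {n : Nat} (hnd : l.Nodup)
    (h : l[n]? = some x) : pvIdx x l = some n := by
  induction l generalizing n with
  | nil => simp at h
  | cons w rest ih =>
      cases n with
      | zero =>
          simp at h
          simp [pvIdx, h]
      | succ m =>
          simp only [List.getElem?_cons_succ] at h
          have hx : x ∈ rest := List.mem_of_getElem? h
          have hw : w ≠ x := by
            intro he; subst he
            exact (List.nodup_cons.mp hnd).1 hx
          simp only [pvIdx, hw, if_false]
          rw [ih (List.nodup_cons.mp hnd).2 h]
          rfl

-- ---- the rank dict of B computes pvIdx ----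
theorem pv_rank_fold_notmem (l : List String) (d : PySem.Dict String Int) (k : Int)
    (x : String) (hx : x ∉ l) :
    ((l.foldl (fun st w => (st.1.insert w st.2, st.2 + 1)) (d, k)).1).get? x = d.get? x := by
  induction l generalizing d k with
  | nil => rfl
  | cons w rest ih =>
      simp only [List.foldl_cons]
      rw [ih _ _ (fun h => hx (List.mem_cons_of_mem _ h))]
      exact PySem.Dict.get?_insert_of_ne _ _ (fun he => hx (he ▸ List.mem_cons_self ..))

theorem pv_rank_fold_get (l : List String) (hnd : l.Nodup) (d : PySem.Dict String Int)
    (k : Int) (x : String) :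
    ((l.foldl (fun st w => (st.1.insert w st.2, st.2 + 1)) (d, k)).1).get? x
      = match pvIdx x l with
        | some n => some (k + n)
        | none => d.get? x := by
  induction l generalizing d k with
  | nil => rfl
  | cons w rest ih =>
      simp only [List.foldl_cons, pvIdx]
      by_cases hw : w = x
      · subst hw
        have hx : w ∉ rest := (List.nodup_cons.mp hnd).1
        rw [pv_rank_fold_notmem rest _ _ w hx]
        simp [PySem.Dict.get?_insert_self]
      · simp only [hw, if_false]
        rw [ih (List.nodup_cons.mp hnd).2]
        cases hm : pvIdx x rest with
        | none => simp only []; exact PySem.Dict.get?_insert_of_ne _ _ (Ne.symm hw)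
        | some m =>
            simp only [Option.map_some]
            congr 1
            push_cast
            ring

theorem pv_strong_nodup : pvStrong.Nodup := by decide

theorem pv_rank_get (x : String) :
    pvRank.get? x = (pvIdx x pvStrong).map (fun n => (n : Int)) := by
  unfold pvRank
  rw [pv_rank_fold_get pvStrong pv_strong_nodup PySem.Dict.empty 0 x]
  cases pvIdx x pvStrong <;> simp [PySem.Dict.get?_empty]

-- the Int rank with default 21
def pvRkI (x : String) : Int :=
  match pvIdx x pvStrong with
  | some n => (n : Int)
  | none => 21

theorem pv_bestStep_eq (b : Int) (w : String) :
    pvBestStep b w = min b (pvRkI (PySem.Str.lower w)) := by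
  unfold pvBestStep pvRkI
  rw [PySem.Dict.getD_eq_get?_getD, pv_rank_get]
  cases pvIdx (PySem.Str.lower w) pvStrong <;> simp

theorem pv_rkI_lt_of_mem {x : String} (h : x ∈ pvStrong) : pvRkI x < 21 := by
  unfold pvRkI
  cases hm : pvIdx x pvStrong with
  | none =>
      have := pvIdx_isSome_of_mem h
      rw [hm] at this; simp at this
  | some n =>
      have h21 : pvStrong.length = 21 := by decide
      have := pvIdx_lt hm
      rw [h21] at this
      show (n : Int) < 21
      omega

-- B's best accumulator as a plain min-fold over the ranks of the lowered words
theorem pv_best_eq (parts : List String) (b : Int) :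
    parts.foldl pvBestStep b
      = (parts.map (fun w => pvRkI (PySem.Str.lower w))).foldl min b := by
  rw [List.foldl_map]
  exact PySem.List.foldl_congr_mem _ _ _ _ (fun acc x _ => pv_bestStep_eq acc x)

-- A's outer loop is find? over the strong list followed by the inner scan
theorem pv_outerA_eq_find (parts lowers : List String) (s : List String)
    (h : ∀ w ∈ s, lowers.contains w = true → (pvInnerA w parts).isSome) :
    pvOuterA parts lowers s
      = match s.find? (fun w => lowers.contains w) with
        | some w => pvInnerA w parts
        | none => none := by
  induction s with
  | nil => rfl
  | cons w rest ih =>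
      simp only [pvOuterA]
      by_cases hc : lowers.contains w = true
      · rw [List.find?_cons_of_pos hc]
        have := h w (List.mem_cons_self ..) hc
        cases hg : pvInnerA w parts with
        | none => rw [hg] at this; simp at this
        | some v =>
            have hm : w ∈ lowers := by simpa using hc
            simp [hm, hg]
      · rw [List.find?_cons_of_neg (by simpa using hc)]
        simp only [hc, if_false, Bool.false_eq_true]
        exact ih (fun w' hw' => h w' (List.mem_cons_of_mem _ hw'))

-- find? of the first index satisfying the predicate
theorem pv_find_of_first {l : List String} {P : String → Bool} {n : Nat} {wn : String}
    (hn : l[n]? = some wn) (hP : P wn = true)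
    (hmin : ∀ i, i < n → ∀ wi, l[i]? = some wi → P wi = false) :
    l.find? P = some wn := by
  induction l generalizing n with
  | nil => simp at hn
  | cons a t ih =>
      cases n with
      | zero =>
          simp only [List.getElem?_cons_zero, Option.some.injEq] at hn
          subst hn
          exact List.find?_cons_of_pos hP
      | succ m =>
          have ha : P a = false := hmin 0 (Nat.succ_pos m) a rfl
          rw [List.find?_cons_of_neg (by simp [ha])]
          exact ih (by simpa using hn)
            (fun i hi wi hwi => hmin (i + 1) (by omega) wi (by simpa using hwi))

-- lookup in B's hit dict = A's inner scan (j the rank of wj)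
theorem pv_hit_fold_get (parts : List String) (h : PySem.Dict Int String)
    (wj : String) (j : Int) (hj : ∀ x, pvRank.get? x = some j ↔ x = wj) :
    (parts.foldl pvHitStep h).get? j = (h.get? j).or (pvInnerA wj parts) := by
  induction parts generalizing h with
  | nil => simp [pvInnerA]
  | cons word rest ih =>
      simp only [List.foldl_cons, pvInnerA, pvHitStep]
      by_cases hk : pvRstripS (PySem.Str.lower word) = wj
      · have hg : pvRank.get? (pvRstripS (PySem.Str.lower word)) = some j := (hj _).mpr hk
        simp only [hg]
        by_cases hc : h.contains j = true
        · rw [if_pos hc, ih]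
          rw [PySem.Dict.contains_eq_isSome_get?] at hc
          cases hv : h.get? j with
          | none => rw [hv] at hc; simp at hc
          | some v => simp [hk]
        · rw [if_neg hc, ih]
          have hv : h.get? j = none := by
            rw [PySem.Dict.contains_eq_isSome_get?] at hc
            cases hv : h.get? j with
            | none => rfl
            | some v => rw [hv] at hc; simp at hc
          simp [PySem.Dict.get?_insert_self, hv, hk]
      · have hne : pvInnerA wj (word :: rest) = pvInnerA wj rest := by
          simp [pvInnerA, hk]
        cases hg : pvRank.get? (pvRstripS (PySem.Str.lower word)) with
        | none => simp only [ih]; simp [hk]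
        | some r =>
            have hrj : j ≠ r := by
              intro he; subst he
              exact hk ((hj _).mp hg)
            by_cases hc : h.contains r = true
            · simp only [hc, if_true, ih]
              simp [hk]
            · simp only [hc, if_false, Bool.false_eq_true, ih,
                PySem.Dict.get?_insert_of_ne _ _ hrj]
              simp [hk]

-- B's flag accumulator
theorem pv_long_flag (parts : List String) (f : Bool) (s : String) :
    (parts.foldl pvLongStep (f, s)).1
      = (f || parts.any (fun w => decide (3 < PySem.Str.len w))) := by
  induction parts generalizing f s with
  | nil => simp
  | cons w rest ih =>
      simp only [List.foldl_cons, pvLongStep, List.any_cons]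
      by_cases hw : 3 < PySem.Str.len w
      · simp only [hw, if_true, ih]
        simp
      · simp only [hw, if_false, ih]
        simp

-- B's longest accumulator is the strict-max fold over the stripped filtered words
theorem pv_long_snd (parts : List String) (f : Bool) (s : String) :
    (parts.foldl pvLongStep (f, s)).2
      = (((parts.filter (fun w => decide (3 < PySem.Str.len w))).map pvRstripS).foldl
          (fun acc x => if PySem.Str.len acc < PySem.Str.len x then x else acc) s) := by
  induction parts generalizing f s with
  | nil => simp
  | cons w rest ih =>
      simp only [List.foldl_cons, pvLongStep, List.filter_cons]
      by_cases hw : 3 < PySem.Str.len w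
      · simp only [hw, if_true]
        exact ih _ _
      · simp only [hw, if_false]
        exact ih _ _

-- PySem.List.max? on a cons is the strict-first-max fold from the head
theorem pv_max?_cons (h : String) (t : List String) :
    (PySem.List.max? (h :: t) PySem.Str.len).getD ""
      = t.foldl (fun acc x => if PySem.Str.len acc < PySem.Str.len x then x else acc) h := by
  unfold PySem.List.max?
  simp only [List.foldl_cons]
  induction t generalizing h with
  | nil => rfl
  | cons x rest ih =>
      simp only [List.foldl_cons]
      by_cases hx : PySem.Str.len h < PySem.Str.len x
      · simp only [hx, if_true]
        exact ih x
      · simp only [hx, if_false]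
        exact ih h

theorem pv_len_zero (s : String) (h : PySem.Str.len s = 0) : s = "" := by
  have hl : s.toList = [] := by
    have h' : (s.toList.length : Int) = 0 := by
      simpa [PySem.Str.len, PySem.Chars.len] using h
    have h2 : s.toList.length = 0 := by exact_mod_cast h'
    exact List.eq_nil_of_length_eq_zero h2
  exact String.toList_eq_nil_iff.mp hl

theorem pv_maxD_eq_fold (words : List String) (hne : words ≠ []) :
    PySem.List.maxD words PySem.Str.len ""
      = words.foldl (fun acc x => if PySem.Str.len acc < PySem.Str.len x then x else acc) "" := by
  cases words with
  | nil => exact absurd rfl hne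
  | cons h t =>
      unfold PySem.List.maxD
      rw [pv_max?_cons]
      simp only [List.foldl_cons]
      congr 1
      by_cases hz : PySem.Str.len "" < PySem.Str.len h
      · rw [if_pos hz]
      · have hz0 : PySem.Str.len "" = 0 := by decide
        have hnn : (0 : Int) ≤ PySem.Str.len h := by
          simp [PySem.Str.len]
        have h0 : PySem.Str.len h = 0 := by rw [hz0] at hz; omega
        rw [if_neg hz, pv_len_zero h h0]

-- B's 4-tuple fold is three independent accumulator folds
theorem pv_foldB_split (parts : List String) (b : Int) (h : PySem.Dict Int String)
    (fl : Bool × String) :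
    parts.foldl pvStepB (b, h, fl)
      = (parts.foldl pvBestStep b, parts.foldl pvHitStep h, parts.foldl pvLongStep fl) := by
  induction parts generalizing b h fl with
  | nil => rfl
  | cons w rest ih =>
      simp only [List.foldl_cons, pvStepB]
      exact ih _ _ _

-- the rank of x, as read through pv_rank_get, determines x among the strong words
theorem pv_rank_some_iff (n : Nat) (wn : String) (hwn : pvStrong[n]? = some wn) (x : String) :
    pvRank.get? x = some ((n : Nat) : Int) ↔ x = wn := by
  constructor
  · intro hx
    rw [pv_rank_get] at hx
    cases hmx : pvIdx x pvStrong with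
    | none => rw [hmx] at hx; simp at hx
    | some m =>
        rw [hmx] at hx
        have hm : m = n := by simpa using hx
        subst hm
        have := pvIdx_getElem? hmx
        rw [hwn] at this
        exact (Option.some.injEq _ _ ▸ this).symm
  · intro he
    subst he
    rw [pv_rank_get, pvIdx_of_getElem? pv_strong_nodup hwn]
    rfl

-- every strong word is fixed by rstrip(",.!?")
theorem pv_strong_rstrip : ∀ w ∈ pvStrong, pvRstripS w = w := by decide

-- selection agreement: A's outer loop against B's (best, hit) accumulators
theorem pv_select (parts : List String) :
    pvOuterA parts (parts.map PySem.Str.lower) pvStrong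
      = (if parts.foldl pvBestStep 21 < 21 then
          some (((parts.foldl pvHitStep PySem.Dict.empty).get?
                  (parts.foldl pvBestStep 21)).getD "")
         else none) := by
  have hisSome : ∀ w ∈ pvStrong, (parts.map PySem.Str.lower).contains w = true →
      (pvInnerA w parts).isSome := by
    intro w hw hc
    refine pv_innerA_isSome w parts (pv_strong_rstrip w hw) ?_
    have : w ∈ parts.map PySem.Str.lower := by simpa using hc
    obtain ⟨p, hp, hlp⟩ := List.mem_map.mp this
    exact ⟨p, hp, hlp⟩
  rw [pv_outerA_eq_find parts _ pvStrong hisSome]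
  rw [pv_best_eq]
  by_cases hb : (parts.map fun w => pvRkI (PySem.Str.lower w)).foldl min 21 < 21
  · -- some strong token occurs: locate the minimum
    rcases PySem.List.foldl_min_mem (parts.map fun w => pvRkI (PySem.Str.lower w)) 21 with he | hm
    · rw [he] at hb; omega
    · obtain ⟨p, hp, hfp⟩ := List.mem_map.mp hm
      cases hidx : pvIdx (PySem.Str.lower p) pvStrong with
      | none =>
          rw [show pvRkI (PySem.Str.lower p) = 21 by unfold pvRkI; rw [hidx]] at hfp
          rw [← hfp] at hb; omega
      | some n =>
          have hfold : (parts.map fun w => pvRkI (PySem.Str.lower w)).foldl min 21 = (n : Int) := by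
            rw [← hfp]; unfold pvRkI; rw [hidx]
          have hwn : pvStrong[n]? = some (PySem.Str.lower p) := pvIdx_getElem? hidx
          -- minimality: no earlier strong word occurs among the lowered words
          have hmin : ∀ i, i < n → ∀ wi, pvStrong[i]? = some wi →
              ((parts.map PySem.Str.lower).contains wi) = false := by
            intro i hi wi hwi
            by_contra hcon
            have hctrue : (parts.map PySem.Str.lower).contains wi = true := by
              revert hcon; cases (parts.map PySem.Str.lower).contains wi <;> simp
            have hwim : wi ∈ parts.map PySem.Str.lower := by simpa using hctrue
            obtain ⟨q, hq, hlq⟩ := List.mem_map.mp hwim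
            have hqidx : pvIdx wi pvStrong = some i := pvIdx_of_getElem? pv_strong_nodup hwi
            have hrkq : pvRkI (PySem.Str.lower q) = (i : Int) := by
              unfold pvRkI; rw [hlq, hqidx]
            have hle := (PySem.List.foldl_min_le (parts.map fun w => pvRkI (PySem.Str.lower w)) 21).2
              (pvRkI (PySem.Str.lower q)) (List.mem_map.mpr ⟨q, hq, rfl⟩)
            rw [hrkq, hfold] at hle
            have : (i : Int) < (n : Int) := by exact_mod_cast hi
            omega
          have hPw : ((parts.map PySem.Str.lower).contains (PySem.Str.lower p)) = true := by
            simp only [List.contains_eq_mem, decide_eq_true_eq]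
            exact List.mem_map.mpr ⟨p, hp, rfl⟩
          rw [pv_find_of_first hwn hPw hmin]
          have hsome := hisSome _ (List.mem_of_getElem? hwn) hPw
          cases hr : pvInnerA (PySem.Str.lower p) parts with
          | none => rw [hr] at hsome; simp at hsome
          | some r =>
              rw [if_pos hb, hfold]
              rw [pv_hit_fold_get parts PySem.Dict.empty (PySem.Str.lower p) ((n : Nat) : Int)
                    (pv_rank_some_iff n _ hwn), hr]
              simp [PySem.Dict.get?_empty, hr]
  · -- no strong token occurs
    have hnone : ∀ w ∈ pvStrong, ((parts.map PySem.Str.lower).contains w) = false := by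
      intro w hw
      by_contra hcon
      have hctrue : (parts.map PySem.Str.lower).contains w = true := by
        revert hcon; cases (parts.map PySem.Str.lower).contains w <;> simp
      have hwm : w ∈ parts.map PySem.Str.lower := by simpa using hctrue
      obtain ⟨q, hq, hlq⟩ := List.mem_map.mp hwm
      have hlt : pvRkI (PySem.Str.lower q) < 21 := by rw [hlq]; exact pv_rkI_lt_of_mem hw
      have hle := (PySem.List.foldl_min_le (parts.map fun w => pvRkI (PySem.Str.lower w)) 21).2
        (pvRkI (PySem.Str.lower q)) (List.mem_map.mpr ⟨q, hq, rfl⟩)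
      omega
    rw [List.find?_eq_none.mpr (fun w hw => by rw [hnone w hw]; exact Bool.false_ne_true), if_neg hb]

-- ===== VERDICT (by name: the statement is the Claim_ definition above) =====
theorem find_provocative_word_py_spec : Claim_equal_find_provocative_word_py := by
  intro text _ hpre
  unfold Spec_find_provocative_word_py
  simp only [find_provocative_word_py, find_provocative_word_py_alt]
  rw [pv_str_split_lower, pv_foldB_split, pv_select]
  by_cases hb : (PySem.Str.split₀ text).foldl pvBestStep 21 < 21
  · simp only [if_pos hb]
  · simp only [if_neg hb]
    rw [pv_long_flag, pv_long_snd]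
    by_cases hany : (PySem.Str.split₀ text).any (fun w => decide (3 < PySem.Str.len w)) = true
    · have hfne : (PySem.Str.split₀ text).filter (fun w => decide (3 < PySem.Str.len w)) ≠ [] := by
        obtain ⟨w, hw, hpw⟩ := List.any_eq_true.mp hany
        exact List.ne_nil_of_mem (List.mem_filter.mpr ⟨hw, hpw⟩)
      have hwne : (((PySem.Str.split₀ text).filter
          (fun w => decide (3 < PySem.Str.len w))).map pvRstripS) ≠ [] := by
        simpa [List.map_eq_nil_iff] using hfne
      rw [if_pos hwne]
      simp only [Bool.false_or, hany, if_true]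
      exact pv_maxD_eq_fold _ hwne
    · have hfnil : (PySem.Str.split₀ text).filter (fun w => decide (3 < PySem.Str.len w)) = [] := by
        rw [List.filter_eq_nil_iff]
        intro w hw hpw
        exact hany (List.any_eq_true.mpr ⟨w, hw, hpw⟩)
      have hwnil : (((PySem.Str.split₀ text).filter
          (fun w => decide (3 < PySem.Str.len w))).map pvRstripS) = [] := by
        rw [hfnil]; rfl
      rw [if_neg (fun h => h hwnil)]
      have hanyf : (PySem.Str.split₀ text).any (fun w => decide (3 < PySem.Str.len w)) = false := by
        revert hany; cases (PySem.Str.split₀ text).any (fun w => decide (3 < PySem.Str.len w)) <;> simp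
      simp only [Bool.false_or, hanyf, Bool.false_eq_true, if_false]
      by_cases ht : text.toList ≠ []
      · rw [if_pos ht]
        have hsplit := pv_split_ne_nil text ht hpre
        cases hp : PySem.Str.split₀ text with
        | nil => exact absurd hp hsplit
        | cons p ps => simp [PySem.List.pyGet?, PySem.List.pyIdx?]
      · rw [if_neg ht]
        have ht' : text.toList = [] := by simpa using ht
        have hp : PySem.Str.split₀ text = [] := by
          unfold PySem.Str.split₀
          rw [ht']
          rfl
        rw [hp]
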